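-- pv_equiv track=rewrite | github.com/burjepaul/Measurement | Measurements/measurements.py | detect_quotation_points
-- ===== SOURCE A (Python) =====
-- def detect_quotation_points(lines, measurement_points):
--     quotation_points = []
--     points = []
--
--     for line in lines:
--         for point in lines[line]:
--             if point in measurement_points:
--                 points.append(point)
--
--     for point in measurement_points:
--         if point not in points:
--             quotation_points.append(point)
--
--     return quotation_points
-- ===== SOURCE B (Python) =====
-- def detect_quotation_points(lines, measurement_points):
--     return [p for p in measurement_points
--             if not any(p in lines[line] for line in lines)]
-- ===== Notes on version B (the rewrite author's own statement) =====
-- stated objective: idiomatic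
-- what changed: B drops A's intermediate 'points' index list entirely and filters measurement_points directly, keeping each point that appears in no line's value list.
import Mathlib
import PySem

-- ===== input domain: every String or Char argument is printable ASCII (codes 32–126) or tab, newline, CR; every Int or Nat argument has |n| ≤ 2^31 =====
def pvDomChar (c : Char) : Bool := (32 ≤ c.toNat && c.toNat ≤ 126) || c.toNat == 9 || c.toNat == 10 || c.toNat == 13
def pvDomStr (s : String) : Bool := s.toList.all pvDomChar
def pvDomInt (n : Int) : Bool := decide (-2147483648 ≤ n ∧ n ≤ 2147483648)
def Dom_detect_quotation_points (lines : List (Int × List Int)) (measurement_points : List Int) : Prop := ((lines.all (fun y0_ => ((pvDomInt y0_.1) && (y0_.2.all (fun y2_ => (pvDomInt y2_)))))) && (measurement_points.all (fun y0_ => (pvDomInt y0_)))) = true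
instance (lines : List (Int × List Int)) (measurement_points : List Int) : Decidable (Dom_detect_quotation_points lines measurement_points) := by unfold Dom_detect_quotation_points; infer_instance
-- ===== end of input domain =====

-- ===== PORT A =====
-- B filters measurement_points directly instead of building A's intermediate index list (idiomatic; equal cost).
def detect_quotation_points (lines : List (Int × List Int)) (measurement_points : List Int) : List Int :=
  let points := lines.foldl (fun pts kv =>
    kv.2.foldl (fun pts point =>
      if point ∈ measurement_points then pts ++ [point] else pts) pts) []
  measurement_points.foldl (fun qps point =>
    if point ∉ points then qps ++ [point] else qps) []

-- ===== PORT B =====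
def detect_quotation_points_alt (lines : List (Int × List Int)) (measurement_points : List Int) : List Int :=
  measurement_points.filter (fun p => !(lines.any (fun kv => kv.2.contains p)))

-- ===== PRECONDITION & SPEC =====
def Spec_detect_quotation_points (lines : List (Int × List Int)) (measurement_points : List Int) (out : List Int) : Prop := out = detect_quotation_points_alt lines measurement_points
instance (lines : List (Int × List Int)) (measurement_points : List Int) (out : List Int) : Decidable (Spec_detect_quotation_points lines measurement_points out) := by unfold Spec_detect_quotation_points; infer_instance

-- ===== CLAIM (what is proved, stated in full; the proofs are below) =====
def Claim_equal_detect_quotation_points : Prop := ∀ (lines : List (Int × List Int)) (measurement_points : List Int), Dom_detect_quotation_points lines measurement_points → Spec_detect_quotation_points lines measurement_points (detect_quotation_points lines measurement_points)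

-- ===== LEMMAS AND PROOFS =====

-- ===== VERDICT (by name: the statement is the Claim_ definition above) =====
-- membership in the inner fold of A's first loop
theorem pv_inner_mem (mps : List Int) (v : List Int) (pts : List Int) (x : Int) :
    (x ∈ v.foldl (fun pts point => if point ∈ mps then pts ++ [point] else pts) pts) ↔
      x ∈ pts ∨ (x ∈ v ∧ x ∈ mps) := by
  induction v generalizing pts with
  | nil => simp
  | cons h t ih =>
    simp only [List.foldl_cons]
    by_cases hm : h ∈ mps
    · rw [if_pos hm, ih]
      simp only [List.mem_append, List.mem_cons]
      constructor
      · rintro ((a | (rfl | h0)) | ⟨b, c⟩)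
        · tauto
        · exact Or.inr ⟨Or.inl rfl, hm⟩
        · cases h0
        · tauto
      · rintro (a | ⟨(rfl | b), c⟩) <;> tauto
    · rw [if_neg hm, ih]
      simp only [List.mem_cons]
      constructor
      · tauto
      · rintro (a | ⟨(rfl | b), c⟩)
        · tauto
        · exact absurd c hm
        · tauto

-- membership in A's 'points' list
theorem pv_points_mem (mps : List Int) (lines : List (Int × List Int)) (pts : List Int) (x : Int) :
    (x ∈ lines.foldl (fun pts kv =>
        kv.2.foldl (fun pts point => if point ∈ mps then pts ++ [point] else pts) pts) pts) ↔
      x ∈ pts ∨ ((∃ kv ∈ lines, x ∈ kv.2) ∧ x ∈ mps) := by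
  induction lines generalizing pts with
  | nil => simp
  | cons h t ih =>
    simp only [List.foldl_cons, ih, pv_inner_mem]
    constructor
    · rintro ((a | ⟨b, c⟩) | ⟨⟨kv, hk, hx⟩, hm⟩)
      · tauto
      · exact Or.inr ⟨⟨h, List.mem_cons_self .., b⟩, c⟩
      · exact Or.inr ⟨⟨kv, List.mem_cons_of_mem _ hk, hx⟩, hm⟩
    · rintro (a | ⟨⟨kv, hk, hx⟩, hm⟩)
      · tauto
      · rcases List.mem_cons.mp hk with rfl | hk
        · exact Or.inl (Or.inr ⟨hx, hm⟩)
        · exact Or.inr ⟨⟨kv, hk, hx⟩, hm⟩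

theorem detect_quotation_points_spec : Claim_equal_detect_quotation_points := by
  intro lines mps _
  show detect_quotation_points lines mps = detect_quotation_points_alt lines mps
  unfold detect_quotation_points detect_quotation_points_alt
  rw [PySem.List.foldl_append_ite_eq_filter]
  simp only [List.nil_append]
  apply List.filter_congr
  intro x hx
  simp only [pv_points_mem, List.contains_eq_mem]
  by_cases hany : ∃ kv ∈ lines, x ∈ kv.2
  · simp [hany, hx]
  · have h3 : ∀ (a : Int) (b : List Int), (a, b) ∈ lines → x ∉ b :=
      fun a b hab hb => hany ⟨(a, b), hab, hb⟩
    simp [hany, hx]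
    exact h3
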